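-- pv_equiv track=rewrite | github.com/tonyxieuoft/BCB430_Chang_Lab_program | NCBI_Genome_Blaster/improved_full_assembler.py | _convert_hsp_to_array
-- ===== SOURCE A (Python) =====
-- def _convert_hsp_to_array(hsp):
--     """
--     Conversion: The hsp_s_array has exactly the same number of indices as the range of the query
--     sequence. It collapses insertions in the subject into a neighboring index
--     """
--     hsp_s_array = []
--     hsp_q_array = []
--     cache = ""
--     for i in range(len(hsp["qseq"])):
--         if hsp["qseq"][i] == "-":
--             cache += hsp["hseq"][i]
--         else:
--             hsp_s_array.append(cache + hsp["hseq"][i])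
--             cache = ""
--
--             hsp_q_array.append(hsp["qseq"][i])
--
--     return hsp_q_array, hsp_s_array
-- ===== SOURCE B (Python) =====
-- def _convert_hsp_to_array(hsp):
--     q = hsp["qseq"]
--     h = hsp["hseq"]
--     anchors = [i for i, c in enumerate(q) if c != "-"]
--     hsp_q_array = [q[i] for i in anchors]
--     hsp_s_array = []
--     prev = -1
--     for i in anchors:
--         hsp_s_array.append(h[prev + 1:i + 1])
--         prev = i
--     return hsp_q_array, hsp_s_array
-- ===== Notes on version B (the rewrite author's own statement) =====
-- stated objective: alternative
-- what changed: B first computes the anchor indices (non-dash query positions) once, builds the query array by direct indexing and the subject array by slicing hseq between consecutive anchors with a prev cursor, instead of A's single char-by-char loop with a running string cache.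
-- outside the precondition, e.g. on _convert_hsp_to_array({'qseq': ''}): A returns ([], []), B raises KeyError
import Mathlib
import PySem

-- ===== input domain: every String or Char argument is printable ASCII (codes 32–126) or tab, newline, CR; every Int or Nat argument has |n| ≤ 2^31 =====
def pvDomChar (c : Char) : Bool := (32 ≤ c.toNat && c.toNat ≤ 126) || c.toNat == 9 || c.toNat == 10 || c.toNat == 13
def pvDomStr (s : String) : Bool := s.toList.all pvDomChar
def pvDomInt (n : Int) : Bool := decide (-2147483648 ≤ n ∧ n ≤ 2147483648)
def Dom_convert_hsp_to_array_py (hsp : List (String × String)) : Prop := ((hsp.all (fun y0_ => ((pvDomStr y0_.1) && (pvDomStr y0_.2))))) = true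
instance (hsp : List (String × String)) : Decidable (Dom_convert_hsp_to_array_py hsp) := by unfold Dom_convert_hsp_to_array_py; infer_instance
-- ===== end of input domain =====

-- B rebuilds the arrays from the anchor indices (non-dash query positions) by indexing and
-- slicing, instead of A's char-by-char loop with a running cache string; same cost, a
-- different decomposition.  Only the return value is at issue: neither version mutates hsp.

-- ===== PORT A =====
-- A's loop body (one step of 'for i in range(len(qseq))'); state = (q_array, s_array, cache).
def stepA (q h : List Char) (st : List String × List String × List Char) (i : Nat) :
    List String × List String × List Char :=
  if q.getD i ' ' = '-' then
    (st.1, st.2.1, st.2.2 ++ [h.getD i ' '])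
  else
    (st.1 ++ [String.ofList [q.getD i ' ']],
     st.2.1 ++ [String.ofList (st.2.2 ++ [h.getD i ' '])],
     [])

-- hsp["qseq"]/["hseq"] is first-match lookup (KeyError totalised with getD "": missing keys
-- are excluded by Pre_); hseq[i] totalised with getD ' ' (IndexError excluded by Pre_).
def convert_hsp_to_array_py (hsp : List (String × String)) : List String × List String :=
  let q : List Char := (((PySem.Dict.mk hsp).get? "qseq").getD "").toList
  let h : List Char := (((PySem.Dict.mk hsp).get? "hseq").getD "").toList
  let st := (List.range q.length).foldl (stepA q h) ([], [], [])
  (st.1, st.2.1)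

-- ===== PORT B =====
-- B's loop body over the anchors; state = (s_array, prev).
def stepB (h : List Char) (st : List String × Int) (i : Int) : List String × Int :=
  (st.1 ++ [String.ofList (PySem.List.slice h (some (st.2 + 1)) (some (i + 1)))], i)

-- anchors = [i for i, c in enumerate(q) if c != '-']; q_array by indexing q[i] (totalised
-- with pyGetD: every anchor is in range), s_array by slicing h[prev+1 : i+1], prev from -1.
def convert_hsp_to_array_py_alt (hsp : List (String × String)) : List String × List String :=
  let q : List Char := (((PySem.Dict.mk hsp).get? "qseq").getD "").toList
  let h : List Char := (((PySem.Dict.mk hsp).get? "hseq").getD "").toList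
  let anchors : List Int := ((PySem.List.enumerate q).filter (fun p => p.2 != '-')).map Prod.fst
  let qa : List String := anchors.map (fun i => String.ofList [PySem.List.pyGetD q i ' '])
  let sa : List String := (anchors.foldl (stepB h) ([], -1)).1
  (qa, sa)

-- ===== PRECONDITION & SPEC =====
-- Pre_ excludes the inputs on which A raises (missing "qseq"/"hseq" key → KeyError, or hseq
-- shorter than qseq → IndexError) and additionally those with "qseq" mapped to "" and no
-- "hseq" key, where A returns ([], []) but B itself raises KeyError on its hseq lookup.
def Pre_convert_hsp_to_array_py (hsp : List (String × String)) : Prop :=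
  ((PySem.Dict.mk hsp).get? "qseq").isSome = true ∧
  ((PySem.Dict.mk hsp).get? "hseq").isSome = true ∧
  (((PySem.Dict.mk hsp).get? "qseq").getD "").toList.length ≤
    (((PySem.Dict.mk hsp).get? "hseq").getD "").toList.length
instance (hsp : List (String × String)) : Decidable (Pre_convert_hsp_to_array_py hsp) := by
  unfold Pre_convert_hsp_to_array_py; infer_instance

def pvWitness_convert_hsp_to_array_py : (List (String × String)) :=
  [("qseq", "AC-G"), ("hseq", "A-TG")]

def Spec_convert_hsp_to_array_py (hsp : List (String × String)) (out : List String × List String) : Prop := out = convert_hsp_to_array_py_alt hsp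
instance (hsp : List (String × String)) (out : List String × List String) : Decidable (Spec_convert_hsp_to_array_py hsp out) := by unfold Spec_convert_hsp_to_array_py; infer_instance

-- ===== CLAIM (what is proved, stated in full; the proofs are below) =====
def Claim_equal_convert_hsp_to_array_py : Prop := ∀ (hsp : List (String × String)), Dom_convert_hsp_to_array_py hsp → Pre_convert_hsp_to_array_py hsp → Spec_convert_hsp_to_array_py hsp (convert_hsp_to_array_py hsp)

-- ===== LEMMAS AND PROOFS =====

-- Char-level common core: (query chars, subject chunks) of the aligned tail, with the pending
-- dash-run cache prepended to the first subject chunk.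
def coreRec : List (Char × Char) → List Char → List (List Char) × List (List Char)
  | [], _ => ([], [])
  | (qc, hc) :: rest, cache =>
    if qc = '-' then coreRec rest (cache ++ [hc])
    else ([qc] :: (coreRec rest []).1, (cache ++ [hc]) :: (coreRec rest []).2)

-- Nat-level anchor indices of q (non-dash positions).
def ancN : List Char → List Nat
  | [] => []
  | qc :: q' => if qc = '-' then (ancN q').map (· + 1) else 0 :: (ancN q').map (· + 1)

-- Nat-level chunks: the slice of h from position p through each successive anchor, inclusive.
def saChunks : List Char → Nat → List Nat → List (List Char)
  | _, _, [] => []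
  | h, p, k :: rest => ((h.drop p).take (k + 1 - p)) :: saChunks h (k + 1) rest

def pFirst (c : List Char) : List (List Char) → List (List Char)
  | [] => []
  | x :: xs => (c ++ x) :: xs

lemma pFirst_nil (l : List (List Char)) : pFirst [] l = l := by
  cases l <;> simp [pFirst]

lemma enum_shift {α : Type} (xs : List α) (s : Int) :
    PySem.List.enumerate xs (s + 1) = (PySem.List.enumerate xs s).map (fun p => (p.1 + 1, p.2)) := by
  induction xs generalizing s with
  | nil => simp [PySem.List.enumerate_nil]
  | cons x xs ih => simp [PySem.List.enumerate_cons, ih]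

lemma map_fst_filter_shift (l : List (Int × Char)) :
    ((l.map (fun p => (p.1 + 1, p.2))).filter (fun p => p.2 != '-')).map Prod.fst
      = ((l.filter (fun p => p.2 != '-')).map Prod.fst).map (fun i => i + 1) := by
  simp [List.filter_map, List.map_map, Function.comp_def]

-- B's anchors are exactly ancN, cast to Int.
lemma anc_eq (q : List Char) :
    ((PySem.List.enumerate q).filter (fun p => p.2 != '-')).map Prod.fst
      = List.map (fun k : Nat => (k : Int)) (ancN q) := by
  induction q with
  | nil => simp [PySem.List.enumerate_nil, ancN]
  | cons qc q' ih =>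
    rw [PySem.List.enumerate_cons, enum_shift]
    by_cases hqc : qc = '-'
    · rw [List.filter_cons_of_neg (by simp [hqc])]
      rw [map_fst_filter_shift, ih]
      simp only [ancN, hqc]
      simp [List.map_map, Function.comp_def]
    · rw [List.filter_cons_of_pos (by simp [hqc])]
      simp only [List.map_cons]
      rw [map_fst_filter_shift, ih]
      simp only [ancN, hqc]
      congr 1
      simp [List.map_map, Function.comp_def]

lemma getD_shift (qc : Char) (q' : List Char) :
    ((fun k => [(qc :: q').getD k ' ']) ∘ (· + 1 : Nat → Nat)) = fun k => [q'.getD k ' '] := by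
  funext k; simp

lemma stepA_succ (qc hc : Char) (q h : List Char) (st : List String × List String × List Char)
    (i : Nat) : stepA (qc :: q) (hc :: h) st (i + 1) = stepA q h st i := by
  simp [stepA]

-- A's fold computes String.ofList of the char-level core, behind the accumulators.
lemma foldA_eq :
    ∀ (q h : List Char), q.length ≤ h.length → ∀ (qa sa : List String) (cache : List Char),
    (((List.range q.length).foldl (stepA q h) (qa, sa, cache)).1,
     ((List.range q.length).foldl (stepA q h) (qa, sa, cache)).2.1)
    = (qa ++ ((coreRec (q.zip h) cache).1).map String.ofList,
       sa ++ ((coreRec (q.zip h) cache).2).map String.ofList) := by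
  intro q
  induction q with
  | nil => intro h _ qa sa cache; simp [coreRec]
  | cons qc q' ih =>
    intro h hle qa sa cache
    cases h with
    | nil => simp at hle
    | cons hc h' =>
      have hstep : (fun (st : List String × List String × List Char) (i : Nat) =>
          stepA (qc :: q') (hc :: h') st (Nat.succ i)) = stepA q' h' := by
        funext st i; exact stepA_succ qc hc q' h' st i
      rw [List.length_cons, List.range_succ_eq_map, List.foldl_cons, List.foldl_map, hstep]
      by_cases hqc : qc = '-'
      · have h0 : stepA (qc :: q') (hc :: h') (qa, sa, cache) 0
            = (qa, sa, cache ++ [hc]) := by simp [stepA, hqc]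
        rw [h0, ih h' (by simpa using hle) qa sa (cache ++ [hc])]
        simp [coreRec, hqc]
      · have h0 : stepA (qc :: q') (hc :: h') (qa, sa, cache) 0
            = (qa ++ [String.ofList [qc]], sa ++ [String.ofList (cache ++ [hc])], []) := by
          simp [stepA, hqc]
        rw [h0, ih h' (by simpa using hle) _ _ []]
        simp [coreRec, hqc]

-- B's query array is the core's first component.
lemma qa_core :
    ∀ (q h : List Char), q.length ≤ h.length → ∀ (cache : List Char),
    (ancN q).map (fun k => [q.getD k ' ']) = (coreRec (q.zip h) cache).1 := by
  intro q
  induction q with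
  | nil => intro h _ cache; simp [ancN, coreRec]
  | cons qc q' ih =>
    intro h hle cache
    cases h with
    | nil => simp at hle
    | cons hc h' =>
      by_cases hqc : qc = '-'
      · simp only [ancN, coreRec, List.zip_cons_cons, hqc, reduceIte, List.map_map]
        rw [getD_shift]
        exact ih h' (by simpa using hle) (cache ++ [hc])
      · simp only [ancN, coreRec, List.zip_cons_cons, hqc, reduceIte, List.map_cons,
          List.map_map, List.getD_cons_zero]
        rw [getD_shift]
        rw [ih h' (by simpa using hle) []]

lemma saChunks_shift (hc : Char) (h : List Char) :
    ∀ (as_ : List Nat) (p : Nat),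
    saChunks (hc :: h) (p + 1) (as_.map (· + 1)) = saChunks h p as_ := by
  intro as_
  induction as_ with
  | nil => intro p; simp [saChunks]
  | cons k rest ih =>
    intro p
    simp only [List.map_cons, saChunks, List.drop_succ_cons]
    rw [show k + 1 + 1 - (p + 1) = k + 1 - p by omega, ih (k + 1)]

-- B's subject chunks (with the cache prepended) are the core's second component.
lemma sa_core :
    ∀ (q h : List Char), q.length ≤ h.length → ∀ (cache : List Char),
    pFirst cache (saChunks h 0 (ancN q)) = (coreRec (q.zip h) cache).2 := by
  intro q
  induction q with
  | nil => intro h _ cache; simp [ancN, saChunks, pFirst, coreRec]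
  | cons qc q' ih =>
    intro h hle cache
    cases h with
    | nil => simp at hle
    | cons hc h' =>
      by_cases hqc : qc = '-'
      · simp only [ancN, coreRec, List.zip_cons_cons, hqc, reduceIte]
        rw [← ih h' (by simpa using hle) (cache ++ [hc])]
        cases hanc : ancN q' with
        | nil => simp [saChunks, pFirst]
        | cons a rest =>
          simp only [List.map_cons, saChunks]
          rw [show a + 1 + 1 - 0 = (a + 1 - 0) + 1 by omega]
          simp only [List.drop_zero, List.take_succ_cons]
          rw [show a + 1 + 1 = (a + 1) + 1 by omega, saChunks_shift hc h' rest (a + 1)]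
          simp [pFirst, List.append_assoc]
      · simp only [ancN, coreRec, List.zip_cons_cons, hqc, reduceIte]
        rw [← ih h' (by simpa using hle) []]
        simp only [saChunks, List.drop_zero, List.take_succ_cons, List.take_zero]
        rw [show (0 : Nat) + 1 = 0 + 1 by rfl, saChunks_shift hc h' (ancN q') 0]
        simp [pFirst]
        cases saChunks h' 0 (ancN q') <;> rfl

-- B's fold over the (cast) anchors computes String.ofList of the chunks.
lemma foldS_eq (h : List Char) :
    ∀ (as_ : List Nat) (acc : List String) (p : Nat),
    ((as_.map (fun k : Nat => (k : Int))).foldl (stepB h) (acc, (p : Int) - 1)).1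
      = acc ++ (saChunks h p as_).map String.ofList := by
  intro as_
  induction as_ with
  | nil => intro acc p; simp [saChunks]
  | cons k rest ih =>
    intro acc p
    simp only [List.map_cons, List.foldl_cons]
    have hstep : stepB h (acc, (p : Int) - 1) (k : Int)
        = (acc ++ [String.ofList ((h.drop p).take (k + 1 - p))], (k : Int)) := by
      simp only [stepB]
      rw [show ((p : Int) - 1 + 1) = (p : Int) by ring,
          show ((k : Int) + 1) = ((k + 1 : Nat) : Int) by push_cast; ring,
          PySem.List.slice_natCast]
    rw [hstep, show (k : Int) = ((k + 1 : Nat) : Int) - 1 by push_cast; ring, ih]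
    simp [saChunks]

-- ===== VERDICT (by name: the statement is the Claim_ definition above) =====
theorem convert_hsp_to_array_py_spec : Claim_equal_convert_hsp_to_array_py := by
  intro hsp _ hpre
  obtain ⟨_, _, hle⟩ := hpre
  unfold Spec_convert_hsp_to_array_py convert_hsp_to_array_py convert_hsp_to_array_py_alt
  set q : List Char := (((PySem.Dict.mk hsp).get? "qseq").getD "").toList with hq
  set h : List Char := (((PySem.Dict.mk hsp).get? "hseq").getD "").toList with hh
  simp only []
  have hA := foldA_eq q h hle [] [] []
  have hfst : ((List.range q.length).foldl (stepA q h) ([], [], [])).1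
      = ((coreRec (q.zip h) []).1).map String.ofList := by
    have := congrArg Prod.fst hA; simpa using this
  have hsnd : ((List.range q.length).foldl (stepA q h) ([], [], [])).2.1
      = ((coreRec (q.zip h) []).2).map String.ofList := by
    have := congrArg Prod.snd hA; simpa using this
  have hqa : (List.map (fun k : Nat => (k : Int)) (ancN q)).map
        (fun i => String.ofList [PySem.List.pyGetD q i ' '])
      = ((coreRec (q.zip h) []).1).map String.ofList := by
    rw [List.map_map]
    rw [show ((fun i => String.ofList [PySem.List.pyGetD q i ' ']) ∘ (fun k : Nat => (k : Int)))
          = String.ofList ∘ (fun k : Nat => [q.getD k ' ']) by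
        funext k; simp [PySem.List.pyGetD_natCast]]
    rw [← List.map_map, qa_core q h hle []]
  have hsa : ((List.map (fun k : Nat => (k : Int)) (ancN q)).foldl (stepB h) ([], -1)).1
      = ((coreRec (q.zip h) []).2).map String.ofList := by
    rw [show (-1 : Int) = ((0 : Nat) : Int) - 1 by norm_num, foldS_eq h (ancN q) [] 0]
    rw [← sa_core q h hle [], pFirst_nil]
    simp
  rw [hfst, hsnd, anc_eq q, hqa, hsa]
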